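-- pv_equiv track=rewrite | github.com/JoaoLendengues/PROJECT_PARALLELv2 | desktop/updater.py | _find_installer_asset
-- ===== SOURCE A (Python) =====
-- def _find_installer_asset(assets):
--     exe_assets = [asset for asset in assets if asset.get("name", "").lower().endswith(".exe")]
--     if not exe_assets:
--         return None
--
--     preferred_markers = ("setup", "installer")
--
--     for marker in preferred_markers:
--         for asset in exe_assets:
--             asset_name = asset.get("name", "").lower()
--             if marker in asset_name:
--                 return asset
--
--     return exe_assets[0]
-- ===== SOURCE B (Python) =====
-- def _find_installer_asset(assets):
--     exe_assets = [asset for asset in assets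
--                   if asset.get("name", "").lower().endswith(".exe")]
--     if not exe_assets:
--         return None
--
--     def rank(asset):
--         name = asset.get("name", "").lower()
--         if "setup" in name:
--             return 0
--         if "installer" in name:
--             return 1
--         return 2
--
--     return min(exe_assets, key=rank)
-- ===== Notes on version B (the rewrite author's own statement) =====
-- stated objective: simpler
-- what changed: Replaced A's two sequential marker scans over exe_assets with a single min-by-rank pass (rank 0 for 'setup', 1 for 'installer', 2 otherwise), preserving first-occurrence tie-breaking.
import Mathlib
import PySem

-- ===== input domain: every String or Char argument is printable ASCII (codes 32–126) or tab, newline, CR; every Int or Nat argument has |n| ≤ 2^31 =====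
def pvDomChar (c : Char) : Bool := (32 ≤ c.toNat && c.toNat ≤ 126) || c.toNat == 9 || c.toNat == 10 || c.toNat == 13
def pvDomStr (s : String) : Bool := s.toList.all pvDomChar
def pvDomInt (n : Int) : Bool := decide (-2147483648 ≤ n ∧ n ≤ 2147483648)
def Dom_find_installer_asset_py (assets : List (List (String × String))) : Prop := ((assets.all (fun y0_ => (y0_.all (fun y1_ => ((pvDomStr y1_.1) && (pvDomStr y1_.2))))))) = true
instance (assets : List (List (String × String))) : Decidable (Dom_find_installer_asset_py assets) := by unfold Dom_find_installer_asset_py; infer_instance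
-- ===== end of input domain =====

-- B replaces A's two sequential marker scans with one min-by-rank pass (simpler decomposition, same cost).


-- ===== PORT A =====
-- asset.get("name", "") on the association-list encoding of the dict (first match)
def pvNameA (asset : List (String × String)) : String :=
  ((asset.find? (fun p => p.1 == "name")).map Prod.snd).getD ""

def find_installer_asset_py (assets : List (List (String × String))) : Option (List (String × String)) :=
  let exe_assets := assets.filter
    (fun asset => PySem.Str.endswith (PySem.Str.lower (pvNameA asset)) ".exe")
  if exe_assets = [] then none
  else
    let preferred_markers := ["setup", "installer"]
    match preferred_markers.findSome?
        (fun marker => exe_assets.find?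
          (fun asset => PySem.Str.isIn marker (PySem.Str.lower (pvNameA asset)))) with
    | some a => some a
    | none => PySem.List.pyGet? exe_assets 0

-- ===== PORT B =====
def pvNameB (asset : List (String × String)) : String :=
  ((asset.find? (fun p => p.1 == "name")).map Prod.snd).getD ""

-- rank: 0 if "setup" in name, 1 if "installer", else 2
def pvRank (asset : List (String × String)) : Nat :=
  if PySem.Str.isIn "setup" (PySem.Str.lower (pvNameB asset)) then 0
  else if PySem.Str.isIn "installer" (PySem.Str.lower (pvNameB asset)) then 1
  else 2

def find_installer_asset_py_alt (assets : List (List (String × String))) : Option (List (String × String)) :=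
  let exe_assets := assets.filter
    (fun asset => PySem.Str.endswith (PySem.Str.lower (pvNameB asset)) ".exe")
  if exe_assets.isEmpty then none
  else PySem.List.min? exe_assets pvRank

-- ===== PRECONDITION & SPEC =====
def Spec_find_installer_asset_py (assets : List (List (String × String))) (out : Option (List (String × String))) : Prop := out = find_installer_asset_py_alt assets
instance (assets : List (List (String × String))) (out : Option (List (String × String))) : Decidable (Spec_find_installer_asset_py assets out) := by unfold Spec_find_installer_asset_py; infer_instance

-- ===== CLAIM (what is proved, stated in full; the proofs are below) =====
def Claim_equal_find_installer_asset_py : Prop := ∀ (assets : List (List (String × String))), Dom_find_installer_asset_py assets → Spec_find_installer_asset_py assets (find_installer_asset_py assets)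

-- ===== LEMMAS AND PROOFS =====

-- the foldl step inside PySem.List.min?
def pvStep (acc : Option (List (String × String))) (x : List (String × String)) : Option (List (String × String)) :=
  match acc with
  | none => some x
  | some m => if pvRank x < pvRank m then some x else some m

lemma pvRank_le (a : List (String × String)) : pvRank a ≤ 2 := by
  unfold pvRank; split_ifs <;> omega

lemma pvRank_eq_zero_iff (a : List (String × String)) :
    pvRank a = 0 ↔ PySem.Str.isIn "setup" (PySem.Str.lower (pvNameA a)) = true := by
  unfold pvRank pvNameA pvNameB; split_ifs <;> simp_all

lemma pvRank_eq_one_iff (a : List (String × String)) :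
    pvRank a = 1 ↔ (PySem.Str.isIn "setup" (PySem.Str.lower (pvNameA a)) = false ∧
      PySem.Str.isIn "installer" (PySem.Str.lower (pvNameA a)) = true) := by
  unfold pvRank pvNameA pvNameB; split_ifs <;> simp_all

lemma pvStep_rank0 (l : List (List (String × String))) (m : List (String × String))
    (hm : pvRank m = 0) : l.foldl pvStep (some m) = some m := by
  induction l with
  | nil => rfl
  | cons x t ih =>
      simp only [List.foldl, pvStep, hm]
      rw [if_neg (by omega)]
      exact ih

lemma pvStep_rank1 (l : List (List (String × String))) (m : List (String × String))
    (hm : pvRank m = 1) :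
    l.foldl pvStep (some m) =
      match l.find? (fun a => pvRank a == 0) with
      | some a => some a
      | none => some m := by
  induction l generalizing m with
  | nil => rfl
  | cons x t ih =>
      by_cases hx : pvRank x = 0
      · simp only [List.foldl, pvStep, hm, hx, List.find?]
        rw [if_pos (by omega)]
        simp [pvStep_rank0 t x hx]
      · simp only [List.foldl, pvStep, hm, List.find?]
        rw [if_neg (by omega)]
        have : (pvRank x == 0) = false := by simpa using hx
        rw [this]
        exact ih m hm

lemma pvStep_rank2 (l : List (List (String × String))) (m : List (String × String))
    (hm : pvRank m = 2) :
    l.foldl pvStep (some m) =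
      match l.find? (fun a => pvRank a == 0) with
      | some a => some a
      | none =>
        match l.find? (fun a => pvRank a == 1) with
        | some a => some a
        | none => some m := by
  induction l generalizing m with
  | nil => rfl
  | cons x t ih =>
      rcases h0 : pvRank x == 0 with _ | _
      · rcases h1 : pvRank x == 1 with _ | _
        · have hx2 : pvRank x = 2 := by
            have e0 : ¬ pvRank x = 0 := by simpa using h0
            have e1 : ¬ pvRank x = 1 := by simpa using h1
            have := pvRank_le x; omega
          simp only [List.foldl, pvStep, hm, List.find?, h0, h1]
          rw [if_neg (by omega)]
          exact ih m hm
        · have hx1 : pvRank x = 1 := by simpa using h1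
          simp only [List.foldl, pvStep, hm, List.find?, h0, h1]
          rw [if_pos (by omega)]
          rw [pvStep_rank1 t x hx1]
      · have hx0 : pvRank x = 0 := by simpa using h0
        simp only [List.foldl, pvStep, hm, List.find?, h0]
        rw [if_pos (by omega)]
        simp [pvStep_rank0 t x hx0]

lemma pvRank_beq0 (a : List (String × String)) :
    (pvRank a == 0) = PySem.Str.isIn "setup" (PySem.Str.lower (pvNameA a)) := by
  rcases hv : PySem.Str.isIn "setup" (PySem.Str.lower (pvNameA a)) with _ | _
  · rw [beq_eq_false_iff_ne]
    intro hh
    rw [(pvRank_eq_zero_iff a).mp hh] at hv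
    cases hv
  · exact beq_iff_eq.mpr ((pvRank_eq_zero_iff a).mpr hv)

lemma pvFindCons_none {α : Type} {p : α → Bool} {x : α} {t : List α}
    (h : List.find? p (x :: t) = none) : p x = false ∧ List.find? p t = none := by
  rcases hp : p x with _ | _
  · rw [List.find?_cons_of_neg (by simp [hp])] at h
    exact ⟨rfl, h⟩
  · rw [List.find?_cons_of_pos (by exact hp)] at h
    cases h

lemma pvFind_setup (l : List (List (String × String))) :
    l.find? (fun asset => PySem.Str.isIn "setup" (PySem.Str.lower (pvNameA asset)))
      = l.find? (fun a => pvRank a == 0) := by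
  congr 1
  funext a
  exact (pvRank_beq0 a).symm

lemma pvFind_installer (l : List (List (String × String)))
    (h : l.find? (fun a => pvRank a == 0) = none) :
    l.find? (fun asset => PySem.Str.isIn "installer" (PySem.Str.lower (pvNameA asset)))
      = l.find? (fun a => pvRank a == 1) := by
  induction l with
  | nil => rfl
  | cons x t ih =>
      have h := pvFindCons_none h
      have hx0 : ¬ pvRank x = 0 := by simpa using h.1
      have hs : PySem.Str.isIn "setup" (PySem.Str.lower (pvNameA x)) = false := by
        rcases hv : PySem.Str.isIn "setup" (PySem.Str.lower (pvNameA x)) with _ | _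
        · rfl
        · exact absurd ((pvRank_eq_zero_iff x).mpr hv) hx0
      rcases hi : PySem.Str.isIn "installer" (PySem.Str.lower (pvNameA x)) with _ | _
      · have hx1 : ¬ pvRank x = 1 := by
          rw [pvRank_eq_one_iff]; rintro ⟨-, h2⟩; rw [hi] at h2; cases h2
        rw [List.find?_cons_of_neg (by rw [hi]; simp), List.find?_cons_of_neg (by simpa using hx1)]
        exact ih h.2
      · have hx1 : pvRank x = 1 := (pvRank_eq_one_iff x).mpr ⟨hs, hi⟩
        rw [List.find?_cons_of_pos (by exact hi), List.find?_cons_of_pos (by simp [hx1])]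

lemma pvMin_cons (x : List (String × String)) (t : List (List (String × String))) :
    PySem.List.min? (x :: t) pvRank = t.foldl pvStep (some x) := by
  simp only [PySem.List.min?, List.foldl]
  exact List.foldl_ext _ _ _ (fun acc b _ => by cases acc <;> rfl)

-- the main equivalence on the (nonempty) filtered list
lemma pv_main (x : List (String × String)) (t : List (List (String × String))) :
    (match ["setup", "installer"].findSome?
        (fun marker => (x :: t).find?
          (fun asset => PySem.Str.isIn marker (PySem.Str.lower (pvNameA asset)))) with
      | some a => some a
      | none => PySem.List.pyGet? (x :: t) 0)
    = PySem.List.min? (x :: t) pvRank := by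
  rw [pvMin_cons]
  simp only [List.findSome?, pvFind_setup]
  rcases h0 : (x :: t).find? (fun a => pvRank a == 0) with _ | a
  · rw [pvFind_installer _ h0]
    have h0 := pvFindCons_none h0
    have hx0 : ¬ pvRank x = 0 := by simpa using h0.1
    rcases h1 : (x :: t).find? (fun a => pvRank a == 1) with _ | b
    · have h1 := pvFindCons_none h1
      have hx2 : pvRank x = 2 := by
        have e1 : ¬ pvRank x = 1 := by simpa using h1.1
        have := pvRank_le x; omega
      rw [pvStep_rank2 t x hx2, h0.2, h1.2]
      simp [PySem.List.pyGet?, PySem.List.pyIdx?]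
    · by_cases hx1 : pvRank x = 1
      · have hb : b = x := by
          rw [List.find?_cons_of_pos (by simp [hx1])] at h1
          simpa using h1.symm
        rw [pvStep_rank1 t x hx1, h0.2, hb]
      · have hx2 : pvRank x = 2 := by have := pvRank_le x; omega
        rw [List.find?_cons_of_neg (by simpa using hx1)] at h1
        rw [pvStep_rank2 t x hx2, h0.2, h1]
  · by_cases hx0 : pvRank x = 0
    · have ha : a = x := by
        rw [List.find?_cons_of_pos (by simp [hx0])] at h0
        simpa using h0.symm
      rw [pvStep_rank0 t x hx0, ha]
    · rw [List.find?_cons_of_neg (by simpa using hx0)] at h0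
      by_cases hx1 : pvRank x = 1
      · rw [pvStep_rank1 t x hx1, h0]
      · have hx2 : pvRank x = 2 := by have := pvRank_le x; omega
        rw [pvStep_rank2 t x hx2, h0]

-- ===== VERDICT (by name: the statement is the Claim_ definition above) =====
theorem find_installer_asset_py_spec : Claim_equal_find_installer_asset_py := by
  intro assets _
  unfold Spec_find_installer_asset_py find_installer_asset_py find_installer_asset_py_alt
  have hBA : pvNameB = pvNameA := rfl
  rw [hBA]
  cases hfe : assets.filter
      (fun asset => PySem.Str.endswith (PySem.Str.lower (pvNameA asset)) ".exe") with
  | nil => simp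
  | cons x t =>
      simp only [List.isEmpty_cons, if_neg (by simp : ¬ (x :: t) = [])]
      exact (pv_main x t).symm ▸ rfl
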